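-- pv_equiv track=rewrite | github.com/AHussain101/Harper_Prep | routing_engine.py | _determine_region
-- ===== SOURCE A (Python) =====
-- from typing import Optional
--
-- def _determine_region(state: Optional[str]) -> Optional[str]:
--     """
--     Determine geographic region from state code or full state name.
--
--     Args:
--         state: Two-letter state code or full state name
--
--     Returns:
--         Region name (e.g., 'Southeast', 'Northeast')
--     """
--     if not state:
--         return None
--
--     state_upper = state.upper().strip()
--
--     # Map full state names to abbreviations
--     state_name_to_abbrev = {
--         'ALABAMA': 'AL', 'ALASKA': 'AK', 'ARIZONA': 'AZ', 'ARKANSAS': 'AR',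
--         'CALIFORNIA': 'CA', 'COLORADO': 'CO', 'CONNECTICUT': 'CT', 'DELAWARE': 'DE',
--         'FLORIDA': 'FL', 'GEORGIA': 'GA', 'HAWAII': 'HI', 'IDAHO': 'ID',
--         'ILLINOIS': 'IL', 'INDIANA': 'IN', 'IOWA': 'IA', 'KANSAS': 'KS',
--         'KENTUCKY': 'KY', 'LOUISIANA': 'LA', 'MAINE': 'ME', 'MARYLAND': 'MD',
--         'MASSACHUSETTS': 'MA', 'MICHIGAN': 'MI', 'MINNESOTA': 'MN', 'MISSISSIPPI': 'MS',
--         'MISSOURI': 'MO', 'MONTANA': 'MT', 'NEBRASKA': 'NE', 'NEVADA': 'NV',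
--         'NEW HAMPSHIRE': 'NH', 'NEW JERSEY': 'NJ', 'NEW MEXICO': 'NM', 'NEW YORK': 'NY',
--         'NORTH CAROLINA': 'NC', 'NORTH DAKOTA': 'ND', 'OHIO': 'OH', 'OKLAHOMA': 'OK',
--         'OREGON': 'OR', 'PENNSYLVANIA': 'PA', 'RHODE ISLAND': 'RI', 'SOUTH CAROLINA': 'SC',
--         'SOUTH DAKOTA': 'SD', 'TENNESSEE': 'TN', 'TEXAS': 'TX', 'UTAH': 'UT',
--         'VERMONT': 'VT', 'VIRGINIA': 'VA', 'WASHINGTON': 'WA', 'WEST VIRGINIA': 'WV',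
--         'WISCONSIN': 'WI', 'WYOMING': 'WY'
--     }
--
--     # Convert full name to abbreviation if needed
--     if state_upper in state_name_to_abbrev:
--         state_upper = state_name_to_abbrev[state_upper]
--
--     region_mapping = {
--         'Northeast': ['ME', 'NH', 'VT', 'MA', 'RI', 'CT', 'NY', 'NJ', 'PA'],
--         'Southeast': ['DE', 'MD', 'VA', 'WV', 'NC', 'SC', 'GA', 'FL', 'KY', 'TN', 'AL', 'MS', 'AR', 'LA'],
--         'Midwest': ['OH', 'MI', 'IN', 'IL', 'WI', 'MN', 'IA', 'MO', 'ND', 'SD', 'NE', 'KS'],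
--         'Southwest': ['TX', 'OK', 'NM', 'AZ'],
--         'West': ['CO', 'WY', 'MT', 'ID', 'UT', 'NV', 'CA', 'OR', 'WA', 'AK', 'HI']
--     }
--
--     for region, states in region_mapping.items():
--         if state_upper in states:
--             return region
--
--     return None
-- ===== SOURCE B (Python) =====
-- from typing import Optional
--
-- # The state->region data as one flat text table, parsed once at import time:
-- # each entry is "<Region> <state abbreviation or full state name>".
-- _TABLE = (
--     "Northeast ME",
--     "Northeast NH",
--     "Northeast VT",
--     "Northeast MA",
--     "Northeast RI",
--     "Northeast CT",
--     "Northeast NY",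
--     "Northeast NJ",
--     "Northeast PA",
--     "Southeast DE",
--     "Southeast MD",
--     "Southeast VA",
--     "Southeast WV",
--     "Southeast NC",
--     "Southeast SC",
--     "Southeast GA",
--     "Southeast FL",
--     "Southeast KY",
--     "Southeast TN",
--     "Southeast AL",
--     "Southeast MS",
--     "Southeast AR",
--     "Southeast LA",
--     "Midwest OH",
--     "Midwest MI",
--     "Midwest IN",
--     "Midwest IL",
--     "Midwest WI",
--     "Midwest MN",
--     "Midwest IA",
--     "Midwest MO",
--     "Midwest ND",
--     "Midwest SD",
--     "Midwest NE",
--     "Midwest KS",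
--     "Southwest TX",
--     "Southwest OK",
--     "Southwest NM",
--     "Southwest AZ",
--     "West CO",
--     "West WY",
--     "West MT",
--     "West ID",
--     "West UT",
--     "West NV",
--     "West CA",
--     "West OR",
--     "West WA",
--     "West AK",
--     "West HI",
--     "Southeast ALABAMA",
--     "West ALASKA",
--     "Southwest ARIZONA",
--     "Southeast ARKANSAS",
--     "West CALIFORNIA",
--     "West COLORADO",
--     "Northeast CONNECTICUT",
--     "Southeast DELAWARE",
--     "Southeast FLORIDA",
--     "Southeast GEORGIA",
--     "West HAWAII",
--     "West IDAHO",
--     "Midwest ILLINOIS",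
--     "Midwest INDIANA",
--     "Midwest IOWA",
--     "Midwest KANSAS",
--     "Southeast KENTUCKY",
--     "Southeast LOUISIANA",
--     "Northeast MAINE",
--     "Southeast MARYLAND",
--     "Northeast MASSACHUSETTS",
--     "Midwest MICHIGAN",
--     "Midwest MINNESOTA",
--     "Southeast MISSISSIPPI",
--     "Midwest MISSOURI",
--     "West MONTANA",
--     "Midwest NEBRASKA",
--     "West NEVADA",
--     "Northeast NEW HAMPSHIRE",
--     "Northeast NEW JERSEY",
--     "Southwest NEW MEXICO",
--     "Northeast NEW YORK",
--     "Southeast NORTH CAROLINA",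
--     "Midwest NORTH DAKOTA",
--     "Midwest OHIO",
--     "Southwest OKLAHOMA",
--     "West OREGON",
--     "Northeast PENNSYLVANIA",
--     "Northeast RHODE ISLAND",
--     "Southeast SOUTH CAROLINA",
--     "Midwest SOUTH DAKOTA",
--     "Southeast TENNESSEE",
--     "Southwest TEXAS",
--     "West UTAH",
--     "Northeast VERMONT",
--     "Southeast VIRGINIA",
--     "West WASHINGTON",
--     "Southeast WEST VIRGINIA",
--     "Midwest WISCONSIN",
--     "West WYOMING",
-- )
--
-- _STATE_TO_REGION = {}
-- for _line in _TABLE: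
--     _region, _key = _line.split(' ', 1)
--     _STATE_TO_REGION[_key] = _region
--
--
-- def _determine_region(state: Optional[str]) -> Optional[str]:
--     if not state:
--         return None
--     return _STATE_TO_REGION.get(state.upper().strip())
-- ===== Notes on version B (the rewrite author's own statement) =====
-- stated objective: idiomatic
-- what changed: Replaced the name->abbreviation redirect dict plus the loop over region->states lists with inner membership tests by one flat text table ('<Region> <state code or name>' entries) parsed once at import into a single state->region dictionary, so the function body collapses to one dict lookup.
import Mathlib
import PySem

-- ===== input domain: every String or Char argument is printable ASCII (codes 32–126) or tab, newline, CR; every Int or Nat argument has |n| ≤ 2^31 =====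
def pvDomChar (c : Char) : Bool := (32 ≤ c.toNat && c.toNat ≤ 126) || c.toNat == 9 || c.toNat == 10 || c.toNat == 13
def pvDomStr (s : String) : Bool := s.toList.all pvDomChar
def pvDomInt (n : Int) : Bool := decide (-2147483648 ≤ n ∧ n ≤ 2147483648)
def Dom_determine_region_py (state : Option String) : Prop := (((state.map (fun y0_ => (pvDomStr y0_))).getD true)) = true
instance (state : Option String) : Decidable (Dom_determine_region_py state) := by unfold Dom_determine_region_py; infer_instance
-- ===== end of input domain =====

-- B replaces A's name→abbreviation redirect plus the per-region membership scan by one flat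
-- "<Region> <key>" text table parsed once into a state→region dictionary, so the call is a
-- single lookup (objective: idiomatic).

-- ===== PORT A =====
-- the full-name → abbreviation dict of A
def pvNameToAbbrevA : PySem.Dict String String := PySem.Dict.ofList
  [("ALABAMA", "AL"),
   ("ALASKA", "AK"),
   ("ARIZONA", "AZ"),
   ("ARKANSAS", "AR"),
   ("CALIFORNIA", "CA"),
   ("COLORADO", "CO"),
   ("CONNECTICUT", "CT"),
   ("DELAWARE", "DE"),
   ("FLORIDA", "FL"),
   ("GEORGIA", "GA"),
   ("HAWAII", "HI"),
   ("IDAHO", "ID"),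
   ("ILLINOIS", "IL"),
   ("INDIANA", "IN"),
   ("IOWA", "IA"),
   ("KANSAS", "KS"),
   ("KENTUCKY", "KY"),
   ("LOUISIANA", "LA"),
   ("MAINE", "ME"),
   ("MARYLAND", "MD"),
   ("MASSACHUSETTS", "MA"),
   ("MICHIGAN", "MI"),
   ("MINNESOTA", "MN"),
   ("MISSISSIPPI", "MS"),
   ("MISSOURI", "MO"),
   ("MONTANA", "MT"),
   ("NEBRASKA", "NE"),
   ("NEVADA", "NV"),
   ("NEW HAMPSHIRE", "NH"),
   ("NEW JERSEY", "NJ"),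
   ("NEW MEXICO", "NM"),
   ("NEW YORK", "NY"),
   ("NORTH CAROLINA", "NC"),
   ("NORTH DAKOTA", "ND"),
   ("OHIO", "OH"),
   ("OKLAHOMA", "OK"),
   ("OREGON", "OR"),
   ("PENNSYLVANIA", "PA"),
   ("RHODE ISLAND", "RI"),
   ("SOUTH CAROLINA", "SC"),
   ("SOUTH DAKOTA", "SD"),
   ("TENNESSEE", "TN"),
   ("TEXAS", "TX"),
   ("UTAH", "UT"),
   ("VERMONT", "VT"),
   ("VIRGINIA", "VA"),
   ("WASHINGTON", "WA"),
   ("WEST VIRGINIA", "WV"),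
   ("WISCONSIN", "WI"),
   ("WYOMING", "WY")]

-- the region → state-abbreviations dict of A
def pvRegionMappingA : PySem.Dict String (List String) := PySem.Dict.ofList
  [("Northeast", ["ME", "NH", "VT", "MA", "RI", "CT", "NY", "NJ", "PA"]),
   ("Southeast", ["DE", "MD", "VA", "WV", "NC", "SC", "GA", "FL", "KY", "TN", "AL", "MS", "AR", "LA"]),
   ("Midwest", ["OH", "MI", "IN", "IL", "WI", "MN", "IA", "MO", "ND", "SD", "NE", "KS"]),
   ("Southwest", ["TX", "OK", "NM", "AZ"]),
   ("West", ["CO", "WY", "MT", "ID", "UT", "NV", "CA", "OR", "WA", "AK", "HI"])]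

-- the 'for region, states in region_mapping.items(): if state_upper in states: return region' loop
def pvRegionLoopA : List (String × List String) → String → Option String
  | [], _ => none
  | (region, states) :: rest, t => if states.contains t then some region else pvRegionLoopA rest t

def determine_region_py (state : Option String) : Option String :=
  match state with
  | none => none
  | some s =>
    if s = "" then none
    else
      let stateUpper := PySem.Str.strip (PySem.Str.upper s)
      -- 'if state_upper in dict: state_upper = dict[state_upper]' (lookup guarded, so getD is exact)
      let stateUpper := if pvNameToAbbrevA.contains stateUpper
                        then pvNameToAbbrevA.getD stateUpper stateUpper else stateUpper
      pvRegionLoopA pvRegionMappingA.items stateUpper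

-- ===== PORT B =====
-- _TABLE: one entry per key, "<Region> <abbreviation or full name>"
def pvTableB : List String :=
  ["Northeast ME",
   "Northeast NH",
   "Northeast VT",
   "Northeast MA",
   "Northeast RI",
   "Northeast CT",
   "Northeast NY",
   "Northeast NJ",
   "Northeast PA",
   "Southeast DE",
   "Southeast MD",
   "Southeast VA",
   "Southeast WV",
   "Southeast NC",
   "Southeast SC",
   "Southeast GA",
   "Southeast FL",
   "Southeast KY",
   "Southeast TN",
   "Southeast AL",
   "Southeast MS",
   "Southeast AR",
   "Southeast LA",
   "Midwest OH",
   "Midwest MI",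
   "Midwest IN",
   "Midwest IL",
   "Midwest WI",
   "Midwest MN",
   "Midwest IA",
   "Midwest MO",
   "Midwest ND",
   "Midwest SD",
   "Midwest NE",
   "Midwest KS",
   "Southwest TX",
   "Southwest OK",
   "Southwest NM",
   "Southwest AZ",
   "West CO",
   "West WY",
   "West MT",
   "West ID",
   "West UT",
   "West NV",
   "West CA",
   "West OR",
   "West WA",
   "West AK",
   "West HI",
   "Southeast ALABAMA",
   "West ALASKA",
   "Southwest ARIZONA",
   "Southeast ARKANSAS",
   "West CALIFORNIA",
   "West COLORADO",
   "Northeast CONNECTICUT",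
   "Southeast DELAWARE",
   "Southeast FLORIDA",
   "Southeast GEORGIA",
   "West HAWAII",
   "West IDAHO",
   "Midwest ILLINOIS",
   "Midwest INDIANA",
   "Midwest IOWA",
   "Midwest KANSAS",
   "Southeast KENTUCKY",
   "Southeast LOUISIANA",
   "Northeast MAINE",
   "Southeast MARYLAND",
   "Northeast MASSACHUSETTS",
   "Midwest MICHIGAN",
   "Midwest MINNESOTA",
   "Southeast MISSISSIPPI",
   "Midwest MISSOURI",
   "West MONTANA",
   "Midwest NEBRASKA",
   "West NEVADA",
   "Northeast NEW HAMPSHIRE",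
   "Northeast NEW JERSEY",
   "Southwest NEW MEXICO",
   "Northeast NEW YORK",
   "Southeast NORTH CAROLINA",
   "Midwest NORTH DAKOTA",
   "Midwest OHIO",
   "Southwest OKLAHOMA",
   "West OREGON",
   "Northeast PENNSYLVANIA",
   "Northeast RHODE ISLAND",
   "Southeast SOUTH CAROLINA",
   "Midwest SOUTH DAKOTA",
   "Southeast TENNESSEE",
   "Southwest TEXAS",
   "West UTAH",
   "Northeast VERMONT",
   "Southeast VIRGINIA",
   "West WASHINGTON",
   "Southeast WEST VIRGINIA",
   "Midwest WISCONSIN",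
   "West WYOMING"]

-- the import-time parse loop:
-- for _line in _TABLE: _region, _key = _line.split(' ', 1); _STATE_TO_REGION[_key] = _region
def pvStateToRegionB : PySem.Dict String String :=
  pvTableB.foldl
    (fun d line =>
      match PySem.Str.splitMax? line " " 1 with
      | some (region :: key :: _) => d.insert key region
      | _ => d)  -- unreachable: every table entry contains a space, so split(' ', 1) yields two parts
    PySem.Dict.empty

def determine_region_py_alt (state : Option String) : Option String :=
  match state with
  | none => none
  | some s =>
    if s = "" then none
    else pvStateToRegionB.get? (PySem.Str.strip (PySem.Str.upper s))

-- ===== PRECONDITION & SPEC =====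
def Spec_determine_region_py (state : Option String) (out : Option String) : Prop := out = determine_region_py_alt state
instance (state : Option String) (out : Option String) : Decidable (Spec_determine_region_py state out) := by unfold Spec_determine_region_py; infer_instance

-- ===== CLAIM (what is proved, stated in full; the proofs are below) =====
def Claim_equal_determine_region_py : Prop := ∀ (state : Option String), Dom_determine_region_py state → Spec_determine_region_py state (determine_region_py state)

-- ===== LEMMAS AND PROOFS =====
set_option maxRecDepth 1000000
set_option maxHeartbeats 2000000

-- all 100 keys either program can hit: the 50 abbreviations then the 50 full names
def pvAllKeys : List String :=
  ["ME", "NH", "VT", "MA", "RI", "CT", "NY", "NJ", "PA", "DE", "MD", "VA", "WV", "NC", "SC", "GA", "FL", "KY", "TN", "AL", "MS", "AR", "LA", "OH", "MI", "IN", "IL", "WI", "MN", "IA", "MO", "ND", "SD", "NE", "KS", "TX", "OK", "NM", "AZ", "CO", "WY", "MT", "ID", "UT", "NV", "CA", "OR", "WA", "AK", "HI", "ALABAMA", "ALASKA", "ARIZONA", "ARKANSAS", "CALIFORNIA", "COLORADO", "CONNECTICUT", "DELAWARE", "FLORIDA", "GEORGIA", "HAWAII", "IDAHO", "ILLINOIS",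 "INDIANA", "IOWA", "KANSAS", "KENTUCKY", "LOUISIANA", "MAINE", "MARYLAND", "MASSACHUSETTS", "MICHIGAN", "MINNESOTA", "MISSISSIPPI", "MISSOURI", "MONTANA", "NEBRASKA", "NEVADA", "NEW HAMPSHIRE", "NEW JERSEY", "NEW MEXICO", "NEW YORK", "NORTH CAROLINA", "NORTH DAKOTA", "OHIO", "OKLAHOMA", "OREGON", "PENNSYLVANIA", "RHODE ISLAND", "SOUTH CAROLINA", "SOUTH DAKOTA", "TENNESSEE", "TEXAS", "UTAH", "VERMONT", "VIRGINIA", "WASHINGTON", "WEST VIRGINIA", "WISCONSIN", "WYOMING"]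

-- the two A-side dicts evaluated to their literal items lists
theorem pvNameToAbbrevA_eq : pvNameToAbbrevA = PySem.Dict.mk
  [("ALABAMA", "AL"),
   ("ALASKA", "AK"),
   ("ARIZONA", "AZ"),
   ("ARKANSAS", "AR"),
   ("CALIFORNIA", "CA"),
   ("COLORADO", "CO"),
   ("CONNECTICUT", "CT"),
   ("DELAWARE", "DE"),
   ("FLORIDA", "FL"),
   ("GEORGIA", "GA"),
   ("HAWAII", "HI"),
   ("IDAHO", "ID"),
   ("ILLINOIS", "IL"),
   ("INDIANA", "IN"),
   ("IOWA", "IA"),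
   ("KANSAS", "KS"),
   ("KENTUCKY", "KY"),
   ("LOUISIANA", "LA"),
   ("MAINE", "ME"),
   ("MARYLAND", "MD"),
   ("MASSACHUSETTS", "MA"),
   ("MICHIGAN", "MI"),
   ("MINNESOTA", "MN"),
   ("MISSISSIPPI", "MS"),
   ("MISSOURI", "MO"),
   ("MONTANA", "MT"),
   ("NEBRASKA", "NE"),
   ("NEVADA", "NV"),
   ("NEW HAMPSHIRE", "NH"),
   ("NEW JERSEY", "NJ"),
   ("NEW MEXICO", "NM"),
   ("NEW YORK", "NY"),
   ("NORTH CAROLINA", "NC"),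
   ("NORTH DAKOTA", "ND"),
   ("OHIO", "OH"),
   ("OKLAHOMA", "OK"),
   ("OREGON", "OR"),
   ("PENNSYLVANIA", "PA"),
   ("RHODE ISLAND", "RI"),
   ("SOUTH CAROLINA", "SC"),
   ("SOUTH DAKOTA", "SD"),
   ("TENNESSEE", "TN"),
   ("TEXAS", "TX"),
   ("UTAH", "UT"),
   ("VERMONT", "VT"),
   ("VIRGINIA", "VA"),
   ("WASHINGTON", "WA"),
   ("WEST VIRGINIA", "WV"),
   ("WISCONSIN", "WI"),
   ("WYOMING", "WY")] := by decide

theorem pvRegionMappingA_eq : pvRegionMappingA = PySem.Dict.mk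
  [("Northeast", ["ME", "NH", "VT", "MA", "RI", "CT", "NY", "NJ", "PA"]),
   ("Southeast", ["DE", "MD", "VA", "WV", "NC", "SC", "GA", "FL", "KY", "TN", "AL", "MS", "AR", "LA"]),
   ("Midwest", ["OH", "MI", "IN", "IL", "WI", "MN", "IA", "MO", "ND", "SD", "NE", "KS"]),
   ("Southwest", ["TX", "OK", "NM", "AZ"]),
   ("West", ["CO", "WY", "MT", "ID", "UT", "NV", "CA", "OR", "WA", "AK", "HI"])] := by decide

-- each table entry parsed: split(' ', 1) yields [region, key]
theorem pvParseLines : pvTableB.map (fun l => PySem.Str.splitMax? l " " 1) =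
  [some ["Northeast", "ME"],
   some ["Northeast", "NH"],
   some ["Northeast", "VT"],
   some ["Northeast", "MA"],
   some ["Northeast", "RI"],
   some ["Northeast", "CT"],
   some ["Northeast", "NY"],
   some ["Northeast", "NJ"],
   some ["Northeast", "PA"],
   some ["Southeast", "DE"],
   some ["Southeast", "MD"],
   some ["Southeast", "VA"],
   some ["Southeast", "WV"],
   some ["Southeast", "NC"],
   some ["Southeast", "SC"],
   some ["Southeast", "GA"],
   some ["Southeast", "FL"],
   some ["Southeast", "KY"],
   some ["Southeast", "TN"],
   some ["Southeast", "AL"],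
   some ["Southeast", "MS"],
   some ["Southeast", "AR"],
   some ["Southeast", "LA"],
   some ["Midwest", "OH"],
   some ["Midwest", "MI"],
   some ["Midwest", "IN"],
   some ["Midwest", "IL"],
   some ["Midwest", "WI"],
   some ["Midwest", "MN"],
   some ["Midwest", "IA"],
   some ["Midwest", "MO"],
   some ["Midwest", "ND"],
   some ["Midwest", "SD"],
   some ["Midwest", "NE"],
   some ["Midwest", "KS"],
   some ["Southwest", "TX"],
   some ["Southwest", "OK"],
   some ["Southwest", "NM"],
   some ["Southwest", "AZ"],
   some ["West", "CO"],
   some ["West", "WY"],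
   some ["West", "MT"],
   some ["West", "ID"],
   some ["West", "UT"],
   some ["West", "NV"],
   some ["West", "CA"],
   some ["West", "OR"],
   some ["West", "WA"],
   some ["West", "AK"],
   some ["West", "HI"],
   some ["Southeast", "ALABAMA"],
   some ["West", "ALASKA"],
   some ["Southwest", "ARIZONA"],
   some ["Southeast", "ARKANSAS"],
   some ["West", "CALIFORNIA"],
   some ["West", "COLORADO"],
   some ["Northeast", "CONNECTICUT"],
   some ["Southeast", "DELAWARE"],
   some ["Southeast", "FLORIDA"],
   some ["Southeast", "GEORGIA"],
   some ["West", "HAWAII"],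
   some ["West", "IDAHO"],
   some ["Midwest", "ILLINOIS"],
   some ["Midwest", "INDIANA"],
   some ["Midwest", "IOWA"],
   some ["Midwest", "KANSAS"],
   some ["Southeast", "KENTUCKY"],
   some ["Southeast", "LOUISIANA"],
   some ["Northeast", "MAINE"],
   some ["Southeast", "MARYLAND"],
   some ["Northeast", "MASSACHUSETTS"],
   some ["Midwest", "MICHIGAN"],
   some ["Midwest", "MINNESOTA"],
   some ["Southeast", "MISSISSIPPI"],
   some ["Midwest", "MISSOURI"],
   some ["West", "MONTANA"],
   some ["Midwest", "NEBRASKA"],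
   some ["West", "NEVADA"],
   some ["Northeast", "NEW HAMPSHIRE"],
   some ["Northeast", "NEW JERSEY"],
   some ["Southwest", "NEW MEXICO"],
   some ["Northeast", "NEW YORK"],
   some ["Southeast", "NORTH CAROLINA"],
   some ["Midwest", "NORTH DAKOTA"],
   some ["Midwest", "OHIO"],
   some ["Southwest", "OKLAHOMA"],
   some ["West", "OREGON"],
   some ["Northeast", "PENNSYLVANIA"],
   some ["Northeast", "RHODE ISLAND"],
   some ["Southeast", "SOUTH CAROLINA"],
   some ["Midwest", "SOUTH DAKOTA"],
   some ["Southeast", "TENNESSEE"],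
   some ["Southwest", "TEXAS"],
   some ["West", "UTAH"],
   some ["Northeast", "VERMONT"],
   some ["Southeast", "VIRGINIA"],
   some ["West", "WASHINGTON"],
   some ["Southeast", "WEST VIRGINIA"],
   some ["Midwest", "WISCONSIN"],
   some ["West", "WYOMING"]] := by decide

-- B's parsed dict evaluated to its literal items list
theorem pvStateToRegionB_eq : pvStateToRegionB = PySem.Dict.mk
  [("ME", "Northeast"),
   ("NH", "Northeast"),
   ("VT", "Northeast"),
   ("MA", "Northeast"),
   ("RI", "Northeast"),
   ("CT", "Northeast"),
   ("NY", "Northeast"),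
   ("NJ", "Northeast"),
   ("PA", "Northeast"),
   ("DE", "Southeast"),
   ("MD", "Southeast"),
   ("VA", "Southeast"),
   ("WV", "Southeast"),
   ("NC", "Southeast"),
   ("SC", "Southeast"),
   ("GA", "Southeast"),
   ("FL", "Southeast"),
   ("KY", "Southeast"),
   ("TN", "Southeast"),
   ("AL", "Southeast"),
   ("MS", "Southeast"),
   ("AR", "Southeast"),
   ("LA", "Southeast"),
   ("OH", "Midwest"),
   ("MI", "Midwest"),
   ("IN", "Midwest"),
   ("IL", "Midwest"),
   ("WI", "Midwest"),
   ("MN", "Midwest"),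
   ("IA", "Midwest"),
   ("MO", "Midwest"),
   ("ND", "Midwest"),
   ("SD", "Midwest"),
   ("NE", "Midwest"),
   ("KS", "Midwest"),
   ("TX", "Southwest"),
   ("OK", "Southwest"),
   ("NM", "Southwest"),
   ("AZ", "Southwest"),
   ("CO", "West"),
   ("WY", "West"),
   ("MT", "West"),
   ("ID", "West"),
   ("UT", "West"),
   ("NV", "West"),
   ("CA", "West"),
   ("OR", "West"),
   ("WA", "West"),
   ("AK", "West"),
   ("HI", "West"),
   ("ALABAMA", "Southeast"),
   ("ALASKA", "West"),
   ("ARIZONA", "Southwest"),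
   ("ARKANSAS", "Southeast"),
   ("CALIFORNIA", "West"),
   ("COLORADO", "West"),
   ("CONNECTICUT", "Northeast"),
   ("DELAWARE", "Southeast"),
   ("FLORIDA", "Southeast"),
   ("GEORGIA", "Southeast"),
   ("HAWAII", "West"),
   ("IDAHO", "West"),
   ("ILLINOIS", "Midwest"),
   ("INDIANA", "Midwest"),
   ("IOWA", "Midwest"),
   ("KANSAS", "Midwest"),
   ("KENTUCKY", "Southeast"),
   ("LOUISIANA", "Southeast"),
   ("MAINE", "Northeast"),
   ("MARYLAND", "Southeast"),
   ("MASSACHUSETTS", "Northeast"),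
   ("MICHIGAN", "Midwest"),
   ("MINNESOTA", "Midwest"),
   ("MISSISSIPPI", "Southeast"),
   ("MISSOURI", "Midwest"),
   ("MONTANA", "West"),
   ("NEBRASKA", "Midwest"),
   ("NEVADA", "West"),
   ("NEW HAMPSHIRE", "Northeast"),
   ("NEW JERSEY", "Northeast"),
   ("NEW MEXICO", "Southwest"),
   ("NEW YORK", "Northeast"),
   ("NORTH CAROLINA", "Southeast"),
   ("NORTH DAKOTA", "Midwest"),
   ("OHIO", "Midwest"),
   ("OKLAHOMA", "Southwest"),
   ("OREGON", "West"),
   ("PENNSYLVANIA", "Northeast"),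
   ("RHODE ISLAND", "Northeast"),
   ("SOUTH CAROLINA", "Southeast"),
   ("SOUTH DAKOTA", "Midwest"),
   ("TENNESSEE", "Southeast"),
   ("TEXAS", "Southwest"),
   ("UTAH", "West"),
   ("VERMONT", "Northeast"),
   ("VIRGINIA", "Southeast"),
   ("WASHINGTON", "West"),
   ("WEST VIRGINIA", "Southeast"),
   ("WISCONSIN", "Midwest"),
   ("WYOMING", "West")] := by
  have h : pvStateToRegionB =
      (pvTableB.map (fun l => PySem.Str.splitMax? l " " 1)).foldl
        (fun d p =>
          match p with
          | some (region :: key :: _) => d.insert key region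
          | _ => d)
        PySem.Dict.empty := by
    rw [List.foldl_map]; rfl
  rw [h, pvParseLines]
  decide

theorem pv_core (t : String) :
    pvRegionLoopA pvRegionMappingA.items
      (if pvNameToAbbrevA.contains t then pvNameToAbbrevA.getD t t else t)
      = pvStateToRegionB.get? t := by
  rw [pvStateToRegionB_eq, pvNameToAbbrevA_eq, pvRegionMappingA_eq]
  by_cases h : t ∈ pvAllKeys
  · fin_cases h <;> decide
  · simp only [pvAllKeys, List.mem_cons, List.not_mem_nil, or_false, not_or] at h
    obtain ⟨h0, h1, h2, h3, h4, h5, h6, h7, h8, h9, h10, h11, h12, h13, h14, h15, h16, h17, h18, h19, h20, h21, h22, h23, h24, h25, h26, h27, h28, h29, h30, h31, h32, h33, h34, h35, h36, h37, h38, h39, h40, h41, h42, h43, h44, h45, h46, h47, h48, h49, h50, h51, h52, h53, h54, h55, h56, h57, h58, h59, h60, h61, h62, h63, h64, h65, h66, h67, h68, h69, h70, h71, h72, h73, h74, h75, h76, h77, h78, h79, h80, h81, h82, h83, h84, h85, h86, h87, h88, h89, h90, h91, h92, h93, h94, h95, h96, h97, h98, h99⟩ := h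
    have hc : (PySem.Dict.mk
      [("ALABAMA", "AL"),
   ("ALASKA", "AK"),
   ("ARIZONA", "AZ"),
   ("ARKANSAS", "AR"),
   ("CALIFORNIA", "CA"),
   ("COLORADO", "CO"),
   ("CONNECTICUT", "CT"),
   ("DELAWARE", "DE"),
   ("FLORIDA", "FL"),
   ("GEORGIA", "GA"),
   ("HAWAII", "HI"),
   ("IDAHO", "ID"),
   ("ILLINOIS", "IL"),
   ("INDIANA", "IN"),
   ("IOWA", "IA"),
   ("KANSAS", "KS"),
   ("KENTUCKY", "KY"),
   ("LOUISIANA", "LA"),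
   ("MAINE", "ME"),
   ("MARYLAND", "MD"),
   ("MASSACHUSETTS", "MA"),
   ("MICHIGAN", "MI"),
   ("MINNESOTA", "MN"),
   ("MISSISSIPPI", "MS"),
   ("MISSOURI", "MO"),
   ("MONTANA", "MT"),
   ("NEBRASKA", "NE"),
   ("NEVADA", "NV"),
   ("NEW HAMPSHIRE", "NH"),
   ("NEW JERSEY", "NJ"),
   ("NEW MEXICO", "NM"),
   ("NEW YORK", "NY"),
   ("NORTH CAROLINA", "NC"),
   ("NORTH DAKOTA", "ND"),
   ("OHIO", "OH"),
   ("OKLAHOMA", "OK"),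
   ("OREGON", "OR"),
   ("PENNSYLVANIA", "PA"),
   ("RHODE ISLAND", "RI"),
   ("SOUTH CAROLINA", "SC"),
   ("SOUTH DAKOTA", "SD"),
   ("TENNESSEE", "TN"),
   ("TEXAS", "TX"),
   ("UTAH", "UT"),
   ("VERMONT", "VT"),
   ("VIRGINIA", "VA"),
   ("WASHINGTON", "WA"),
   ("WEST VIRGINIA", "WV"),
   ("WISCONSIN", "WI"),
   ("WYOMING", "WY")]).contains t = false := by
      rw [PySem.Dict.contains_eq_decide_mem_keys]
      simp [h50, h51, h52, h53, h54, h55, h56, h57, h58, h59, h60, h61, h62, h63, h64, h65, h66, h67, h68, h69, h70, h71, h72, h73, h74, h75, h76, h77, h78, h79, h80, h81, h82, h83, h84, h85, h86, h87, h88, h89, h90, h91, h92, h93, h94, h95, h96, h97, h98, h99]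
    rw [if_neg (by simp [hc])]
    have hget : (PySem.Dict.mk
      [("ME", "Northeast"),
   ("NH", "Northeast"),
   ("VT", "Northeast"),
   ("MA", "Northeast"),
   ("RI", "Northeast"),
   ("CT", "Northeast"),
   ("NY", "Northeast"),
   ("NJ", "Northeast"),
   ("PA", "Northeast"),
   ("DE", "Southeast"),
   ("MD", "Southeast"),
   ("VA", "Southeast"),
   ("WV", "Southeast"),
   ("NC", "Southeast"),
   ("SC", "Southeast"),
   ("GA", "Southeast"),
   ("FL", "Southeast"),
   ("KY", "Southeast"),
   ("TN", "Southeast"),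
   ("AL", "Southeast"),
   ("MS", "Southeast"),
   ("AR", "Southeast"),
   ("LA", "Southeast"),
   ("OH", "Midwest"),
   ("MI", "Midwest"),
   ("IN", "Midwest"),
   ("IL", "Midwest"),
   ("WI", "Midwest"),
   ("MN", "Midwest"),
   ("IA", "Midwest"),
   ("MO", "Midwest"),
   ("ND", "Midwest"),
   ("SD", "Midwest"),
   ("NE", "Midwest"),
   ("KS", "Midwest"),
   ("TX", "Southwest"),
   ("OK", "Southwest"),
   ("NM", "Southwest"),
   ("AZ", "Southwest"),
   ("CO", "West"),
   ("WY", "West"),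
   ("MT", "West"),
   ("ID", "West"),
   ("UT", "West"),
   ("NV", "West"),
   ("CA", "West"),
   ("OR", "West"),
   ("WA", "West"),
   ("AK", "West"),
   ("HI", "West"),
   ("ALABAMA", "Southeast"),
   ("ALASKA", "West"),
   ("ARIZONA", "Southwest"),
   ("ARKANSAS", "Southeast"),
   ("CALIFORNIA", "West"),
   ("COLORADO", "West"),
   ("CONNECTICUT", "Northeast"),
   ("DELAWARE", "Southeast"),
   ("FLORIDA", "Southeast"),
   ("GEORGIA", "Southeast"),
   ("HAWAII", "West"),
   ("IDAHO", "West"),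
   ("ILLINOIS", "Midwest"),
   ("INDIANA", "Midwest"),
   ("IOWA", "Midwest"),
   ("KANSAS", "Midwest"),
   ("KENTUCKY", "Southeast"),
   ("LOUISIANA", "Southeast"),
   ("MAINE", "Northeast"),
   ("MARYLAND", "Southeast"),
   ("MASSACHUSETTS", "Northeast"),
   ("MICHIGAN", "Midwest"),
   ("MINNESOTA", "Midwest"),
   ("MISSISSIPPI", "Southeast"),
   ("MISSOURI", "Midwest"),
   ("MONTANA", "West"),
   ("NEBRASKA", "Midwest"),
   ("NEVADA", "West"),
   ("NEW HAMPSHIRE", "Northeast"),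
   ("NEW JERSEY", "Northeast"),
   ("NEW MEXICO", "Southwest"),
   ("NEW YORK", "Northeast"),
   ("NORTH CAROLINA", "Southeast"),
   ("NORTH DAKOTA", "Midwest"),
   ("OHIO", "Midwest"),
   ("OKLAHOMA", "Southwest"),
   ("OREGON", "West"),
   ("PENNSYLVANIA", "Northeast"),
   ("RHODE ISLAND", "Northeast"),
   ("SOUTH CAROLINA", "Southeast"),
   ("SOUTH DAKOTA", "Midwest"),
   ("TENNESSEE", "Southeast"),
   ("TEXAS", "Southwest"),
   ("UTAH", "West"),
   ("VERMONT", "Northeast"),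
   ("VIRGINIA", "Southeast"),
   ("WASHINGTON", "West"),
   ("WEST VIRGINIA", "Southeast"),
   ("WISCONSIN", "Midwest"),
   ("WYOMING", "West")]).get? t = none := by
      rw [PySem.Dict.get?_eq_none_iff_not_mem_keys]
      simp [h0, h1, h2, h3, h4, h5, h6, h7, h8, h9, h10, h11, h12, h13, h14, h15, h16, h17, h18, h19, h20, h21, h22, h23, h24, h25, h26, h27, h28, h29, h30, h31, h32, h33, h34, h35, h36, h37, h38, h39, h40, h41, h42, h43, h44, h45, h46, h47, h48, h49, h50, h51, h52, h53, h54, h55, h56, h57, h58, h59, h60, h61, h62, h63, h64, h65, h66, h67, h68, h69, h70, h71, h72, h73, h74, h75, h76, h77, h78, h79, h80, h81, h82, h83, h84, h85, h86, h87, h88, h89, h90, h91, h92, h93, h94, h95, h96, h97, h98, h99]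
    rw [hget]
    show pvRegionLoopA _ t = none
    simp [pvRegionLoopA, h0, h1, h2, h3, h4, h5, h6, h7, h8, h9, h10, h11, h12, h13, h14, h15, h16, h17, h18, h19, h20, h21, h22, h23, h24, h25, h26, h27, h28, h29, h30, h31, h32, h33, h34, h35, h36, h37, h38, h39, h40, h41, h42, h43, h44, h45, h46, h47, h48, h49]

-- ===== VERDICT (by name: the statement is the Claim_ definition above) =====
theorem determine_region_py_spec : Claim_equal_determine_region_py := by
  intro state _
  unfold Spec_determine_region_py determine_region_py determine_region_py_alt
  match state with
  | none => rfl
  | some s =>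
    by_cases hs : s = ""
    · simp [hs]
    · simp only [if_neg hs]
      exact pv_core (PySem.Str.strip (PySem.Str.upper s))
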